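-- pv_equiv track=rewrite | github.com/davidoseihwedieh/ip-ingenuity-protocol | creatorfi/ai_recommendation_system.py | _encode_platforms
-- ===== SOURCE A (Python) =====
-- from typing import Dict, List, Tuple, Optional
--
-- def _encode_platforms(platforms: List[str]) -> List[float]:
--     """Encode platform presence as binary features"""
--     platform_mapping = {
--         'youtube': 0, 'tiktok': 1, 'instagram': 2, 'twitch': 3,
--         'patreon': 4, 'onlyfans': 5, 'substack': 6, 'spotify': 7
--     }
--     features = [0] * len(platform_mapping)
--     for platform in platforms:
--         if platform.lower() in platform_mapping:
--             features[platform_mapping[platform.lower()]] = 1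
--     return features
-- ===== SOURCE B (Python) =====
-- def _encode_platforms(platforms):
--     """Encode platform presence as binary features (gather over fixed names)."""
--     present = {p.lower() for p in platforms}
--     return [1 if name in present else 0
--             for name in ('youtube', 'tiktok', 'instagram', 'twitch',
--                          'patreon', 'onlyfans', 'substack', 'spotify')]
-- ===== Notes on version B (the rewrite author's own statement) =====
-- stated objective: idiomatic
-- what changed: B builds a set of lowercased input platforms once and gathers the 0/1 vector by a comprehension over the eight fixed platform names, instead of scatter-writing 1s into a pre-zeroed array via dict index lookups while looping over the input.
import Mathlib
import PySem

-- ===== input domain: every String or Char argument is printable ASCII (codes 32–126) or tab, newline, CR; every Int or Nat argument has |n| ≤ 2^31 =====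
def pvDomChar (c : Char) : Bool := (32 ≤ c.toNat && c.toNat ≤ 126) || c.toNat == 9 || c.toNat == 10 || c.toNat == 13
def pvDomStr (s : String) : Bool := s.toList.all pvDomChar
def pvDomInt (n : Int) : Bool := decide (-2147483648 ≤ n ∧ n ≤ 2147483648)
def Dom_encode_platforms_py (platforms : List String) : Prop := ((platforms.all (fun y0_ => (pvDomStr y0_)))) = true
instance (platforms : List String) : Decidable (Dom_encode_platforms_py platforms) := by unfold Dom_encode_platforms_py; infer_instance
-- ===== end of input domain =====

-- B gathers the 0/1 vector by membership over the eight fixed platform names instead of A's scatter-writes into a zeroed array (idiomatic; same cost).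

-- ===== PORT A =====
def pvMapping : PySem.Dict String Int :=
  PySem.Dict.ofList [("youtube", 0), ("tiktok", 1), ("instagram", 2), ("twitch", 3),
                     ("patreon", 4), ("onlyfans", 5), ("substack", 6), ("spotify", 7)]

def encode_platforms_py (platforms : List String) : List Int :=
  platforms.foldl (fun features p =>
    match pvMapping.get? (PySem.Str.lower p) with
    | some i => PySem.List.pySetD features i 1
    | none => features)
    (List.replicate 8 (0 : Int))

-- ===== PORT B =====
def pvNames : List String :=
  ["youtube", "tiktok", "instagram", "twitch", "patreon", "onlyfans", "substack", "spotify"]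

def encode_platforms_py_alt (platforms : List String) : List Int :=
  let present : PySem.Set String := PySem.Set.ofList (platforms.map PySem.Str.lower)
  pvNames.map (fun name => if PySem.Set.contains present name then (1 : Int) else 0)

-- ===== PRECONDITION & SPEC =====
def Spec_encode_platforms_py (platforms : List String) (out : List Int) : Prop := out = encode_platforms_py_alt platforms
instance (platforms : List String) (out : List Int) : Decidable (Spec_encode_platforms_py platforms out) := by unfold Spec_encode_platforms_py; infer_instance

-- ===== CLAIM (what is proved, stated in full; the proofs are below) =====
def Claim_equal_encode_platforms_py : Prop := ∀ (platforms : List String), Dom_encode_platforms_py platforms → Spec_encode_platforms_py platforms (encode_platforms_py platforms)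

-- ===== LEMMAS AND PROOFS =====

-- the value of cell s after processing l, if the cell held a before
def pvInd (s : String) (l : List String) (a : Int) : Int :=
  if s ∈ l.map PySem.Str.lower then 1 else a

theorem pvMapping_mk : pvMapping = PySem.Dict.mk
    [("youtube", 0), ("tiktok", 1), ("instagram", 2), ("twitch", 3),
     ("patreon", 4), ("onlyfans", 5), ("substack", 6), ("spotify", 7)] := by decide

theorem pvGet_youtube : pvMapping.get? "youtube" = some 0 := by decide
theorem pvGet_tiktok : pvMapping.get? "tiktok" = some 1 := by decide
theorem pvGet_instagram : pvMapping.get? "instagram" = some 2 := by decide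
theorem pvGet_twitch : pvMapping.get? "twitch" = some 3 := by decide
theorem pvGet_patreon : pvMapping.get? "patreon" = some 4 := by decide
theorem pvGet_onlyfans : pvMapping.get? "onlyfans" = some 5 := by decide
theorem pvGet_substack : pvMapping.get? "substack" = some 6 := by decide
theorem pvGet_spotify : pvMapping.get? "spotify" = some 7 := by decide

theorem pvSet0 (a0 a1 a2 a3 a4 a5 a6 a7 : Int) :
    PySem.List.pySetD [a0, a1, a2, a3, a4, a5, a6, a7] (0 : Int) 1 = [1, a1, a2, a3, a4, a5, a6, a7] := rfl
theorem pvSet1 (a0 a1 a2 a3 a4 a5 a6 a7 : Int) :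
    PySem.List.pySetD [a0, a1, a2, a3, a4, a5, a6, a7] (1 : Int) 1 = [a0, 1, a2, a3, a4, a5, a6, a7] := rfl
theorem pvSet2 (a0 a1 a2 a3 a4 a5 a6 a7 : Int) :
    PySem.List.pySetD [a0, a1, a2, a3, a4, a5, a6, a7] (2 : Int) 1 = [a0, a1, 1, a3, a4, a5, a6, a7] := rfl
theorem pvSet3 (a0 a1 a2 a3 a4 a5 a6 a7 : Int) :
    PySem.List.pySetD [a0, a1, a2, a3, a4, a5, a6, a7] (3 : Int) 1 = [a0, a1, a2, 1, a4, a5, a6, a7] := rfl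
theorem pvSet4 (a0 a1 a2 a3 a4 a5 a6 a7 : Int) :
    PySem.List.pySetD [a0, a1, a2, a3, a4, a5, a6, a7] (4 : Int) 1 = [a0, a1, a2, a3, 1, a5, a6, a7] := rfl
theorem pvSet5 (a0 a1 a2 a3 a4 a5 a6 a7 : Int) :
    PySem.List.pySetD [a0, a1, a2, a3, a4, a5, a6, a7] (5 : Int) 1 = [a0, a1, a2, a3, a4, 1, a6, a7] := rfl
theorem pvSet6 (a0 a1 a2 a3 a4 a5 a6 a7 : Int) :
    PySem.List.pySetD [a0, a1, a2, a3, a4, a5, a6, a7] (6 : Int) 1 = [a0, a1, a2, a3, a4, a5, 1, a7] := rfl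
theorem pvSet7 (a0 a1 a2 a3 a4 a5 a6 a7 : Int) :
    PySem.List.pySetD [a0, a1, a2, a3, a4, a5, a6, a7] (7 : Int) 1 = [a0, a1, a2, a3, a4, a5, a6, 1] := rfl

theorem pvFoldA (l : List String) (a0 a1 a2 a3 a4 a5 a6 a7 : Int) :
    l.foldl (fun features p =>
      match pvMapping.get? (PySem.Str.lower p) with
      | some i => PySem.List.pySetD features i 1
      | none => features) [a0, a1, a2, a3, a4, a5, a6, a7]
    = [pvInd "youtube" l a0, pvInd "tiktok" l a1, pvInd "instagram" l a2, pvInd "twitch" l a3,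
       pvInd "patreon" l a4, pvInd "onlyfans" l a5, pvInd "substack" l a6, pvInd "spotify" l a7] := by
  induction l generalizing a0 a1 a2 a3 a4 a5 a6 a7 with
  | nil => simp [pvInd]
  | cons q l ih =>
    rw [List.foldl_cons]
    by_cases h0 : "youtube" = PySem.Str.lower q
    · rw [← h0]
      simp only [pvGet_youtube]
      norm_num [pvSet0]
      rw [ih]
      simp [pvInd, ← h0]
    · by_cases h1 : "tiktok" = PySem.Str.lower q
      · rw [← h1]
        simp only [pvGet_tiktok]
        norm_num [pvSet1]
        rw [ih]
        simp [pvInd, ← h1]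
      · by_cases h2 : "instagram" = PySem.Str.lower q
        · rw [← h2]
          simp only [pvGet_instagram]
          norm_num [pvSet2]
          rw [ih]
          simp [pvInd, ← h2]
        · by_cases h3 : "twitch" = PySem.Str.lower q
          · rw [← h3]
            simp only [pvGet_twitch]
            norm_num [pvSet3]
            rw [ih]
            simp [pvInd, ← h3]
          · by_cases h4 : "patreon" = PySem.Str.lower q
            · rw [← h4]
              simp only [pvGet_patreon]
              norm_num [pvSet4]
              rw [ih]
              simp [pvInd, ← h4]
            · by_cases h5 : "onlyfans" = PySem.Str.lower q
              · rw [← h5]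
                simp only [pvGet_onlyfans]
                norm_num [pvSet5]
                rw [ih]
                simp [pvInd, ← h5]
              · by_cases h6 : "substack" = PySem.Str.lower q
                · rw [← h6]
                  simp only [pvGet_substack]
                  norm_num [pvSet6]
                  rw [ih]
                  simp [pvInd, ← h6]
                · by_cases h7 : "spotify" = PySem.Str.lower q
                  · rw [← h7]
                    simp only [pvGet_spotify]
                    norm_num [pvSet7]
                    rw [ih]
                    simp [pvInd, ← h7]
                  · have hn : pvMapping.get? (PySem.Str.lower q) = none := by
                      rw [pvMapping_mk]
                      simp only [PySem.Dict.get?_mk_cons, h0, h1, h2, h3, h4, h5, h6, h7, beq_iff_eq,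
                        if_false, if_neg]
                      simp [PySem.Dict.get?]
                    simp only [hn]
                    rw [ih]
                    simp [pvInd, h0, h1, h2, h3, h4, h5, h6, h7]

theorem pvAltChar (platforms : List String) :
    encode_platforms_py_alt platforms
    = [pvInd "youtube" platforms 0, pvInd "tiktok" platforms 0, pvInd "instagram" platforms 0,
       pvInd "twitch" platforms 0, pvInd "patreon" platforms 0, pvInd "onlyfans" platforms 0,
       pvInd "substack" platforms 0, pvInd "spotify" platforms 0] := by
  simp [encode_platforms_py_alt, pvNames, pvInd, PySem.Set.mem_ofList]

-- ===== VERDICT (by name: the statement is the Claim_ definition above) =====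
theorem encode_platforms_py_spec : Claim_equal_encode_platforms_py := by
  intro platforms _
  show encode_platforms_py platforms = encode_platforms_py_alt platforms
  rw [pvAltChar]
  show platforms.foldl _ [0, 0, 0, 0, 0, 0, 0, 0] = _
  exact pvFoldA platforms 0 0 0 0 0 0 0 0
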